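-- pv_equiv track=rewrite | github.com/akif-caglar/question_detection_vlm | utils.py | find_question_lines
-- ===== SOURCE A (Python) =====
-- def is_digit_text(line):
--     text = line.replace("<", ">")
--     text = text.split(">")
--
--     for el in text:
--         if el.isdigit():
--             return True
--
--     return False
--
-- def find_question_lines(lines):
--     bounding_boxes = []
--     for d_index, line in enumerate(lines):
--         if "D)" in line:
--             collected_lines = [line]
--
--             for i in range(d_index - 1, -1, -1):
--                 if "picture" in lines[i]:
--                     break
--                 elif is_digit_text(lines[i]):
--                     collected_lines.append(lines[i])
--                     break
--                 else:
--                     collected_lines.append(lines[i])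
--
--             collected_lines.reverse()
--             bounding_boxes.append(collected_lines)
--
--     return bounding_boxes
-- ===== SOURCE B (Python) =====
-- def is_digit_text(line):
--     text = line.replace("<", ">")
--     text = text.split(">")
--
--     for el in text:
--         if el.isdigit():
--             return True
--
--     return False
--
-- def find_question_lines(lines):
--     # Single forward pass: `start` marks where the current group would begin.
--     bounding_boxes = []
--     start = 0
--     for i, line in enumerate(lines):
--         if "D)" in line:
--             bounding_boxes.append(lines[start:i + 1])
--         if "picture" in line:
--             start = i + 1
--         elif is_digit_text(line):
--             start = i
--     return bounding_boxes
-- ===== Notes on version B (the rewrite author's own statement) =====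
-- stated objective: alternative
-- what changed: Replaced the per-'D)' backward scan (collect-then-reverse) with a single forward pass that maintains the start index of the current group and emits each group as a slice lines[start:i+1].
import Mathlib
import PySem

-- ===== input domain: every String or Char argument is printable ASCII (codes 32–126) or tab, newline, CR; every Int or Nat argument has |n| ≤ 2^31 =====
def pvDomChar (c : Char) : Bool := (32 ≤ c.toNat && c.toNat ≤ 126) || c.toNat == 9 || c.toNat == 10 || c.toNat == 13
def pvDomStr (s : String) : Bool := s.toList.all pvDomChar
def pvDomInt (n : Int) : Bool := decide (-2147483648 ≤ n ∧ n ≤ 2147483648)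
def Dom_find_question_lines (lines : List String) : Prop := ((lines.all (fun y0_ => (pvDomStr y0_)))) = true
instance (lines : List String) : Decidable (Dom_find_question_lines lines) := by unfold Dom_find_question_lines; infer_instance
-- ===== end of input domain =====

-- B replaces A's per-'D)' backward scan by one forward pass maintaining the group's start index (a different algorithm).

-- ===== PORT A =====
-- helper is_digit_text, shared verbatim by both Pythons
def is_digit_text_loop : List String → Bool
  | [] => false
  | el :: rest => if PySem.Str.strIsdigit el then true else is_digit_text_loop rest

def is_digit_text (line : String) : Bool :=
  let text := PySem.Str.replace line "<" ">"
  -- text.split(">"): sep ">" is non-empty, so Python never raises; split? is some here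
  let text2 := (PySem.Str.split? text ">").getD []
  is_digit_text_loop text2

-- inner loop: for i in range(d_index - 1, -1, -1); the argument counts the indices still to visit
def fqlA_collect (lines : List String) : Nat → List String → List String
  | 0, collected => collected
  | j + 1, collected =>
    let li := PySem.List.pyGetD lines (j : Int) ""
    if PySem.Str.isIn "picture" li then collected
    else if is_digit_text li then collected ++ [li]
    else fqlA_collect lines j (collected ++ [li])

def fqlA_outer (lines : List String) : List String → Nat → List (List String) → List (List String)
  | [], _, acc => acc
  | line :: rest, d_index, acc =>
    fqlA_outer lines rest (d_index + 1)
      (if PySem.Str.isIn "D)" line then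
        acc ++ [(fqlA_collect lines d_index [line]).reverse]
      else acc)

def find_question_lines (lines : List String) : List (List String) :=
  fqlA_outer lines lines 0 []

-- ===== PORT B =====
-- forward pass: first the possible append (with the OLD start), then the start update
def fqlB_loop (lines : List String) : List String → Nat → Nat → List (List String) → List (List String)
  | [], _, _, acc => acc
  | line :: rest, i, start, acc =>
    fqlB_loop lines rest (i + 1)
      (if PySem.Str.isIn "picture" line then i + 1
       else if is_digit_text line then i
       else start)
      (if PySem.Str.isIn "D)" line then
        acc ++ [PySem.List.slice lines (some (start : Int)) (some ((i + 1 : Nat) : Int))]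
      else acc)

def find_question_lines_alt (lines : List String) : List (List String) :=
  fqlB_loop lines lines 0 0 []

-- ===== PRECONDITION & SPEC =====
def Spec_find_question_lines (lines : List String) (out : List (List String)) : Prop := out = find_question_lines_alt lines
instance (lines : List String) (out : List (List String)) : Decidable (Spec_find_question_lines lines out) := by unfold Spec_find_question_lines; infer_instance

-- ===== CLAIM (what is proved, stated in full; the proofs are below) =====
def Claim_equal_find_question_lines : Prop := ∀ (lines : List String), Dom_find_question_lines lines → Spec_find_question_lines lines (find_question_lines lines)

-- ===== LEMMAS AND PROOFS =====

-- the start index B maintains after scanning the first i lines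
def fql_bnd (lines : List String) : Nat → Nat
  | 0 => 0
  | j + 1 =>
    if PySem.Str.isIn "picture" (lines.getD j "") then j + 1
    else if is_digit_text (lines.getD j "") then j
    else fql_bnd lines j

theorem fql_bnd_le (lines : List String) (i : Nat) : fql_bnd lines i ≤ i := by
  induction i with
  | zero => simp [fql_bnd]
  | succ j ih =>
    simp only [fql_bnd]
    split_ifs <;> omega

theorem fqlA_collect_eq (lines : List String) (i : Nat) (hi : i ≤ lines.length)
    (acc : List String) :
    (fqlA_collect lines i acc).reverse
      = (lines.take i).drop (fql_bnd lines i) ++ acc.reverse := by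
  induction i generalizing acc with
  | zero => simp [fqlA_collect, fql_bnd]
  | succ j ih =>
    have hj : j < lines.length := by omega
    have htake : lines.take (j + 1) = lines.take j ++ [lines[j]] := by
      rw [List.take_add_one, List.getElem?_eq_getElem hj]; rfl
    have hlen : (lines.take j).length = j := by rw [List.length_take]; omega
    have hgetD : lines.getD j "" = lines[j] := by
      simp [List.getD, List.getElem?_eq_getElem hj]
    have hget : PySem.List.pyGetD lines (j : Int) "" = lines[j] := by
      rw [PySem.List.pyGetD_natCast, hgetD]
    simp only [fqlA_collect, fql_bnd, hget, hgetD]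
    split_ifs with hp hd
    · have h0 : (lines.take (j + 1)).drop (j + 1) = [] :=
        List.drop_eq_nil_of_le (by rw [List.length_take]; omega)
      rw [h0]; simp
    · rw [htake, List.drop_append_of_le_length (le_of_eq hlen.symm)]
      have h0 : (lines.take j).drop j = [] :=
        List.drop_eq_nil_of_le (le_of_eq hlen)
      rw [h0]; simp
    · rw [ih (by omega), htake,
        List.drop_append_of_le_length (by rw [hlen]; exact fql_bnd_le lines j)]
      simp

theorem fql_loop_eq (lines : List String) (rest : List String) (i : Nat)
    (hdrop : lines.drop i = rest) (acc : List (List String)) :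
    fqlA_outer lines rest i acc = fqlB_loop lines rest i (fql_bnd lines i) acc := by
  induction rest generalizing i acc with
  | nil => simp [fqlA_outer, fqlB_loop]
  | cons l rs ih =>
    have hi : i < lines.length := by
      have := congrArg List.length hdrop
      simp at this; omega
    have h0 : lines[i]? = some l := by
      have := congrArg (·[0]?) hdrop
      simpa [List.getElem?_drop] using this
    have hl : lines[i] = l := by
      have := List.getElem?_eq_getElem hi
      rw [h0] at this
      exact (Option.some.inj this).symm
    have hdrop' : lines.drop (i + 1) = rs := by
      have h1 : lines.drop (i + 1) = (lines.drop i).drop 1 := by rw [List.drop_drop]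
      rw [h1, hdrop]; rfl
    have hb := fql_bnd_le lines i
    have hlen : (lines.take i).length = i := by rw [List.length_take]; omega
    have htake : lines.take (i + 1) = lines.take i ++ [l] := by
      rw [List.take_add_one, List.getElem?_eq_getElem hi, hl]; rfl
    have hslice : PySem.List.slice lines (some ((fql_bnd lines i : Nat) : Int))
        (some ((i + 1 : Nat) : Int)) = (fqlA_collect lines i [l]).reverse := by
      rw [PySem.List.slice_natCast, ← List.drop_take, htake,
        List.drop_append_of_le_length (by rw [hlen]; exact hb),
        fqlA_collect_eq lines i (le_of_lt hi)]
      simp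
    have hbnd : fql_bnd lines (i + 1)
        = (if PySem.Str.isIn "picture" l then i + 1
           else if is_digit_text l then i else fql_bnd lines i) := by
      simp only [fql_bnd]
      rw [List.getD, h0]
      rfl
    simp only [fqlA_outer, fqlB_loop]
    rw [ih (i + 1) hdrop', hbnd, ← hslice]

-- ===== VERDICT (by name: the statement is the Claim_ definition above) =====
theorem find_question_lines_spec : Claim_equal_find_question_lines := by
  intro lines _
  unfold Spec_find_question_lines find_question_lines find_question_lines_alt
  have := fql_loop_eq lines lines 0 (by simp) []
  simpa [fql_bnd] using this
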